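-- pv_equiv track=rewrite | github.com/probablygab/2d-linear-classifier | src/model.py | getNumericTargetFromDataframe
-- ===== SOURCE A (Python) =====
-- def getNumericTargetFromDataframe(dfColumn):
--     '''
--     Converts label strings to unique numbers
--
--     Parameters
--     ----------
--     dfColumn: column of the dataframe with label strings
--
--     Returns
--     -------
--     List with string values mapped to integers
--     '''
--
--     targetDict = {}
--     count = 0
--
--     numTarget = []
--
--     for row in dfColumn:
--         if targetDict.__contains__(str(row)):
--             numTarget.append(targetDict[str(row)])
--         else:
--             targetDict[str(row)] = count
--             count += 1
--             numTarget.append(targetDict[str(row)])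
--
--     return numTarget
-- ===== SOURCE B (Python) =====
-- def getNumericTargetFromDataframe(dfColumn):
--     # Pass 1: ordered set of unique labels (first-appearance order).
--     uniqueLabels = list(dict.fromkeys(str(row) for row in dfColumn))
--     # Index construction, separate from the mapping pass.
--     codeMap = {label: i for i, label in enumerate(uniqueLabels)}
--     # Pass 2: map every row through the finished code map.
--     return [codeMap[str(row)] for row in dfColumn]
-- ===== Notes on version B (the rewrite author's own statement) =====
-- stated objective: alternative
-- what changed: Replaces A's single scan that interleaves dict-building, counting and output-appending with a two-pass decomposition: first build the ordered unique-label list (dict.fromkeys) and an enumerate-based code map, then map the column through the finished map.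
import Mathlib
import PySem

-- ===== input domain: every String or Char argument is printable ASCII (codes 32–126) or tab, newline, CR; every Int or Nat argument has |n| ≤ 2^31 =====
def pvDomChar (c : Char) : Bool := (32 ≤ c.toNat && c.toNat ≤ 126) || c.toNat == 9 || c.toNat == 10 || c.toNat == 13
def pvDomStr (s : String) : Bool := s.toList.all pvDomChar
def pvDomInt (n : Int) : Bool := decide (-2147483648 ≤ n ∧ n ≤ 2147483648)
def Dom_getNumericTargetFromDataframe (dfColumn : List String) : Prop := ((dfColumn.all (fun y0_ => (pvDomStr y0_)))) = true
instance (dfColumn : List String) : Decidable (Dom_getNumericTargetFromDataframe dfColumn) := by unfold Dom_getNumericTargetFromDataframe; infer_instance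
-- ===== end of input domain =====

-- B replaces A's single interleaved scan by a two-pass decomposition (ordered unique
-- labels, then an enumerate code map, then a mapping pass); same cost, alternative structure.

-- ===== PORT A =====
-- A's loop body: state is (targetDict, count, numTarget).  str(row) on a string is the string itself.
-- In both branches Python indexes targetDict[str(row)] on a key that is present, so getD is exact.
def pvStepA (st : PySem.Dict String Int × Int × List Int) (row : String) :
    PySem.Dict String Int × Int × List Int :=
  if st.1.contains row then
    (st.1, st.2.1, st.2.2 ++ [st.1.getD row 0])
  else
    let d' := st.1.insert row st.2.1
    (d', st.2.1 + 1, st.2.2 ++ [d'.getD row 0])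

def getNumericTargetFromDataframe (dfColumn : List String) : List Int :=
  (dfColumn.foldl pvStepA (PySem.Dict.empty, 0, [])).2.2

-- ===== PORT B =====
-- {label: i for i, label in enumerate(uniqueLabels)}
def pvCodeMap (uniqueLabels : List String) : PySem.Dict String Int :=
  (PySem.List.enumerate uniqueLabels).foldl (fun d p => d.insert p.2 p.1) PySem.Dict.empty

def getNumericTargetFromDataframe_alt (dfColumn : List String) : List Int :=
  let uniqueLabels := PySem.List.dedup dfColumn   -- list(dict.fromkeys(...))
  let codeMap := pvCodeMap uniqueLabels
  -- codeMap[str(row)]: the key is always present (row ∈ uniqueLabels), so getD is exact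
  dfColumn.map (fun row => ((codeMap.get? row).getD 0))

-- ===== PRECONDITION & SPEC =====
def Spec_getNumericTargetFromDataframe (dfColumn : List String) (out : List Int) : Prop := out = getNumericTargetFromDataframe_alt dfColumn
instance (dfColumn : List String) (out : List Int) : Decidable (Spec_getNumericTargetFromDataframe dfColumn out) := by unfold Spec_getNumericTargetFromDataframe; infer_instance

-- ===== CLAIM (what is proved, stated in full; the proofs are below) =====
def Claim_equal_getNumericTargetFromDataframe : Prop := ∀ (dfColumn : List String), Dom_getNumericTargetFromDataframe dfColumn → Spec_getNumericTargetFromDataframe dfColumn (getNumericTargetFromDataframe dfColumn)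

-- ===== LEMMAS AND PROOFS =====

-- The code map of a duplicate-free label list looks up the label's index.
theorem pv_get_enumfold (u : List String) (s : Int) (d : PySem.Dict String Int) (x : String)
    (hu : u.Nodup) :
    ((PySem.List.enumerate u s).foldl (fun d p => d.insert p.2 p.1) d).get? x =
      if x ∈ u then some (s + (u.idxOf x : Int)) else d.get? x := by
  induction u generalizing s d with
  | nil => simp
  | cons a u ih =>
    simp only [PySem.List.enumerate_cons, List.foldl_cons]
    rw [ih (hu := hu.of_cons)]
    by_cases hxu : x ∈ u
    · have hxa : x ≠ a := by rintro rfl; exact (List.nodup_cons.mp hu).1 hxu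
      simp [hxu, hxa, List.idxOf_cons_ne _ (Ne.symm hxa)]
      ring
    · by_cases hxa : x = a
      · subst hxa
        simp [hxu, PySem.Dict.get?_insert_self, List.idxOf_cons_self]
      · simp [hxu, hxa, PySem.Dict.get?_insert_of_ne _ _ hxa]

-- The per-row codes A produces, phrased over the running unique-label set.
def pvCodes (u : List String) : List String → List Int
  | [] => []
  | r :: l =>
      (if r ∈ u then ((u.idxOf r : Nat) : Int) else (u.length : Int)) :: pvCodes (PySem.Set.add u r) l

theorem pv_loopA (l : List String) :
    ∀ (u : List String) (d : PySem.Dict String Int) (out : List Int), u.Nodup →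
    (∀ x, d.get? x = if x ∈ u then some ((u.idxOf x : Int)) else none) →
    (l.foldl pvStepA (d, (u.length : Int), out)).2.2 = out ++ pvCodes u l := by
  induction l with
  | nil => intro u d out _ _; simp [pvCodes]
  | cons r l ih =>
    intro u d out hu hd
    simp only [List.foldl_cons, pvCodes]
    have hcont : d.contains r = decide (r ∈ u) := by
      rw [PySem.Dict.contains_eq_isSome_get?, hd r]
      by_cases h : r ∈ u <;> simp [h]
    by_cases hr : r ∈ u
    · have hgd : d.getD r 0 = (u.idxOf r : Int) := by
        rw [PySem.Dict.getD_eq_get?_getD, hd r]; simp [hr]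
      have hstep : pvStepA (d, (u.length : Int), out) r =
          (d, (u.length : Int), out ++ [(u.idxOf r : Int)]) := by
        simp [pvStepA, hcont, hr, hgd]
      rw [hstep, ih u d _ hu hd, PySem.Set.add_of_mem hr]
      simp [hr]
    · have hstep : pvStepA (d, (u.length : Int), out) r =
          (d.insert r (u.length : Int), (u.length : Int) + 1, out ++ [(u.length : Int)]) := by
        simp [pvStepA, hcont, hr, PySem.Dict.getD_insert_self]
      rw [hstep, PySem.Set.add_of_not_mem hr]
      have hu' : (u ++ [r]).Nodup := by
        simp only [List.nodup_append, hu, true_and]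
        exact ⟨List.nodup_singleton r, fun a ha b hb => by
          simp only [List.mem_singleton] at hb; subst hb; rintro rfl; exact hr ha⟩
      have hd' : ∀ x, (d.insert r (u.length : Int)).get? x =
          if x ∈ u ++ [r] then some (((u ++ [r]).idxOf x : Int)) else none := by
        intro x
        by_cases hxr : x = r
        · subst hxr
          rw [PySem.Dict.get?_insert_self]
          rw [List.idxOf_append_of_notMem hr]
          simp [List.idxOf_cons_self]
        · rw [PySem.Dict.get?_insert_of_ne _ _ hxr, hd x]
          by_cases hxu : x ∈ u
          · simp [hxu, List.idxOf_append_of_mem hxu]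
          · simp [hxu, hxr]
      have := ih (u ++ [r]) (d.insert r (u.length : Int)) (out ++ [(u.length : Int)]) hu' hd'
      simp only [List.length_append, List.length_cons, List.length_nil] at this
      push_cast at this ⊢
      rw [this]
      simp [hr]

-- Extending the unique set only appends, so codes over a prefix survive extension.
theorem pv_update_prefix (l u : List String) : ∃ t, PySem.Set.update u l = u ++ t := by
  induction l generalizing u with
  | nil => exact ⟨[], by simp [PySem.Set.update]⟩
  | cons r l ih =>
    have : PySem.Set.update u (r :: l) = PySem.Set.update (PySem.Set.add u r) l := rfl
    rw [this]
    rcases ih (PySem.Set.add u r) with ⟨t, ht⟩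
    rw [PySem.Set.add_eq_ite] at ht
    by_cases hr : r ∈ u
    · exact ⟨t, by simpa [hr] using ht⟩
    · exact ⟨r :: t, by simpa [hr] using ht⟩

theorem pv_codes_eq (l : List String) : ∀ u : List String,
    pvCodes u l = l.map (fun r => (((PySem.Set.update u l).idxOf r : Nat) : Int)) := by
  induction l with
  | nil => intro u; simp [pvCodes]
  | cons r l ih =>
    intro u
    have hupd : PySem.Set.update u (r :: l) = PySem.Set.update (PySem.Set.add u r) l := rfl
    rcases pv_update_prefix l (PySem.Set.add u r) with ⟨t, ht⟩
    have hhead : (if r ∈ u then ((u.idxOf r : Nat) : Int) else (u.length : Int)) =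
        (((PySem.Set.update (PySem.Set.add u r) l).idxOf r : Nat) : Int) := by
      rw [ht]
      by_cases hr : r ∈ u
      · rw [PySem.Set.add_of_mem hr, List.idxOf_append_of_mem hr]
        simp [hr]
      · rw [PySem.Set.add_of_not_mem hr]
        have : r ∈ u ++ [r] := by simp
        rw [List.idxOf_append_of_mem this, List.idxOf_append_of_notMem hr]
        simp [hr, List.idxOf_cons_self]
    simp only [pvCodes, hupd, List.map_cons, hhead, ih (PySem.Set.add u r)]

-- ===== VERDICT (by name: the statement is the Claim_ definition above) =====
theorem getNumericTargetFromDataframe_spec : Claim_equal_getNumericTargetFromDataframe := by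
  intro l _
  show getNumericTargetFromDataframe l = getNumericTargetFromDataframe_alt l
  have hA : getNumericTargetFromDataframe l = pvCodes [] l := by
    have := pv_loopA l [] PySem.Dict.empty [] List.nodup_nil
      (by intro x; simp [PySem.Dict.get?_empty])
    simpa [getNumericTargetFromDataframe] using this
  have hB : getNumericTargetFromDataframe_alt l =
      l.map (fun r => (((PySem.List.dedup l).idxOf r : Nat) : Int)) := by
    unfold getNumericTargetFromDataframe_alt pvCodeMap
    apply List.map_congr_left
    intro r hr
    rw [pv_get_enumfold (PySem.List.dedup l) 0 PySem.Dict.empty r (PySem.List.nodup_dedup l)]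
    simp [hr]
  rw [hA, hB, pv_codes_eq l []]
  have : PySem.Set.update [] l = PySem.List.dedup l := by
    simp [PySem.Set.update, PySem.List.dedup_eq_ofList, PySem.Set.ofList_eq_foldl]
  rw [this]
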